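-- pv_equiv track=rewrite | github.com/fsj-cn/study-notes | make_agree_nocross_cross.py | construct_pos_brackets_from_sent
-- ===== SOURCE A (Python) =====
-- def construct_pos_brackets_from_sent(sent):
--     s = sent.split()
--     ret = []
--     left = 0
--     for w in s:
--         ret.append((left, left+len(w)))
--         left += len(w)
--     return ret
-- ===== SOURCE B (Python) =====
-- def construct_pos_brackets_from_sent(sent):
--     lengths = [len(w) for w in sent.split()]
--     ends = [sum(lengths[:i + 1]) for i in range(len(lengths))]
--     return [(e - l, e) for l, e in zip(lengths, ends)]
-- ===== Notes on version B (the rewrite author's own statement) =====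
-- stated objective: alternative
-- what changed: Replaces the running-offset accumulator loop with a three-stage table construction: a lengths list, a prefix-sum ends table built by slicing, and a zip that derives each start as end minus length.
import Mathlib
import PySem

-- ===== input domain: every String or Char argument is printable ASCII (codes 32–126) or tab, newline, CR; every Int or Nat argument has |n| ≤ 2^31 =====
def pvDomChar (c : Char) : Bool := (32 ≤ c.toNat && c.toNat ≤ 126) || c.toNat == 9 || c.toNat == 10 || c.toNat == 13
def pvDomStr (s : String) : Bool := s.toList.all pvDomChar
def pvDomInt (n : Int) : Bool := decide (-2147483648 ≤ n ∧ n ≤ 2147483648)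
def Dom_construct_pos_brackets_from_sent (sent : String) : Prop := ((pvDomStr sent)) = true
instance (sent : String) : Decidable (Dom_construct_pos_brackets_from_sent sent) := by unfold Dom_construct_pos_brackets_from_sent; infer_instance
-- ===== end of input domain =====

-- B rebuilds the spans from a prefix-sum ends table (lengths, ends, zip) instead of A's
-- running-offset accumulator loop; alternative decomposition, same return value.

-- ===== PORT A =====
def construct_pos_brackets_from_sent (sent : String) : List (Int × Int) :=
  let s := PySem.Str.split₀ sent
  let st := s.foldl
    (fun (st : List (Int × Int) × Int) w =>
      (st.1 ++ [(st.2, st.2 + PySem.Str.len w)], st.2 + PySem.Str.len w))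
    ([], 0)
  st.1

-- ===== PORT B =====
def construct_pos_brackets_from_sent_alt (sent : String) : List (Int × Int) :=
  let lengths : List Int := (PySem.Str.split₀ sent).map PySem.Str.len
  let ends : List Int := (PySem.List.pyRange 0 (PySem.List.len lengths) 1).map
    (fun i => (PySem.List.slice lengths none (some (i + 1))).sum)
  (lengths.zip ends).map (fun p => (p.2 - p.1, p.2))

-- ===== PRECONDITION & SPEC =====
def Spec_construct_pos_brackets_from_sent (sent : String) (out : List (Int × Int)) : Prop := out = construct_pos_brackets_from_sent_alt sent
instance (sent : String) (out : List (Int × Int)) : Decidable (Spec_construct_pos_brackets_from_sent sent out) := by unfold Spec_construct_pos_brackets_from_sent; infer_instance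

-- ===== CLAIM (what is proved, stated in full; the proofs are below) =====
def Claim_equal_construct_pos_brackets_from_sent : Prop := ∀ (sent : String), Dom_construct_pos_brackets_from_sent sent → Spec_construct_pos_brackets_from_sent sent (construct_pos_brackets_from_sent sent)

-- ===== LEMMAS AND PROOFS =====

-- A's loop over any list of word lengths, with arbitrary accumulator and offset,
-- equals B's zip-of-prefix-sums shape shifted by the offset.
theorem pv_main (ls : List Int) (acc : List (Int × Int)) (left : Int) :
    (ls.foldl
      (fun (st : List (Int × Int) × Int) l => (st.1 ++ [(st.2, st.2 + l)], st.2 + l))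
      (acc, left)).1
    = acc ++ (ls.zip ((List.range ls.length).map
        (fun k => left + ((ls.take (k+1)).sum)))).map (fun p => (p.2 - p.1, p.2)) := by
  induction ls generalizing acc left with
  | nil => simp
  | cons l ls ih =>
    have hends : (List.range (l :: ls).length).map
          (fun k => left + (((l :: ls).take (k+1)).sum))
        = (left + l) :: (List.range ls.length).map
          (fun k => (left + l) + ((ls.take (k+1)).sum)) := by
      rw [List.length_cons, List.range_succ_eq_map, List.map_cons, List.map_map]
      refine congrArg₂ _ (by simp) ?_
      apply List.map_congr_left
      intro k _
      simp [Function.comp, List.take_succ_cons]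
      ring
    rw [List.foldl_cons, ih, hends]
    simp [List.zip_cons_cons]

-- ===== VERDICT (by name: the statement is the Claim_ definition above) =====
theorem construct_pos_brackets_from_sent_spec : Claim_equal_construct_pos_brackets_from_sent := by
  intro sent _
  unfold Spec_construct_pos_brackets_from_sent construct_pos_brackets_from_sent
    construct_pos_brackets_from_sent_alt
  simp only []
  rw [show (PySem.Str.split₀ sent).foldl
      (fun (st : List (Int × Int) × Int) w =>
        (st.1 ++ [(st.2, st.2 + PySem.Str.len w)], st.2 + PySem.Str.len w)) ([], 0)
    = ((PySem.Str.split₀ sent).map PySem.Str.len).foldl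
      (fun (st : List (Int × Int) × Int) l => (st.1 ++ [(st.2, st.2 + l)], st.2 + l)) ([], 0)
    from by rw [List.foldl_map]]
  rw [pv_main]
  set ls := (PySem.Str.split₀ sent).map PySem.Str.len with hls
  simp only [List.nil_append]
  congr 1
  rw [PySem.List.len_eq, PySem.List.pyRange_one]
  simp only [Int.sub_zero, Int.toNat_natCast, zero_add]
  congr 1
  rw [List.map_map]
  apply List.map_congr_left
  intro k _
  simp [Function.comp]
  rw [show ((k : Int) + 1) = ((k + 1 : Nat) : Int) by push_cast; ring,
    PySem.List.slice_to_natCast]
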